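-- pv_equiv track=rewrite | github.com/solbiko/algorithm | 프로그래머스/unrated/172927. 광물 캐기/광물 캐기.py | solution
-- ===== SOURCE A (Python) =====
-- def solution(picks, minerals):
--     answer = 0
--
--     if len(minerals)>sum(picks)*5:
--         minerals=minerals[:sum(picks)*5]
--
--     # 광물 5개씩 끊은 리스트
--     mlist=[[0,0,0] for _ in range((len(minerals))//5+1)]
--     for i in range(len(minerals)):
--         if minerals[i]=='diamond':
--             mlist[i//5][0]+=1
--         elif minerals[i]=='iron':
--             mlist[i//5][1]+=1
--         elif minerals[i]=='stone':
--             mlist[i//5][2]+=1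
--
--     mlist.sort(key=lambda x:(-x[0], -x[1], -x[2]))
--
--     for x in mlist:
--         dia,iron,stone = x
--         for j in range(len(picks)):
--             if picks[j]>0 and j==0: # 다이아몬드 곡괭이
--                 picks[j]-=1
--                 answer+=dia+iron+stone
--                 break
--             elif picks[j]>0 and j==1: # 철 곡괭이
--                 picks[j]-=1
--                 answer+=dia*5+iron+stone
--                 break
--             elif picks[j]>0 and j==2: # 돌 곡괭이
--                 picks[j]-=1
--                 answer+=dia*25+iron*5+stone
--                 break
--     return answer
-- ===== SOURCE B (Python) =====
-- def solution(picks, minerals):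
--     # Counting-sort rewrite: reads picks only (A mutates it in place); same return value.
--     if len(minerals) > sum(picks) * 5:
--         minerals = minerals[:sum(picks) * 5]
--
--     # histogram of group types: each block of 5 minerals becomes a (d,i,s) key
--     cnt = {}
--     for k in range(len(minerals) // 5 + 1):
--         chunk = minerals[5 * k:5 * k + 5]
--         key = (chunk.count('diamond'), chunk.count('iron'), chunk.count('stone'))
--         cnt[key] = cnt.get(key, 0) + 1
--
--     r0 = max(picks[0], 0) if len(picks) > 0 else 0
--     r1 = max(picks[1], 0) if len(picks) > 1 else 0
--     r2 = max(picks[2], 0) if len(picks) > 2 else 0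
--
--     # enumerate the bounded key space in descending order; allocate picks in bulk
--     answer = 0
--     for d in range(5, -1, -1):
--         for i in range(5 - d, -1, -1):
--             for s in range(5 - d - i, -1, -1):
--                 c = cnt.get((d, i, s), 0)
--                 t0 = min(r0, c); r0 -= t0; c -= t0
--                 t1 = min(r1, c); r1 -= t1; c -= t1
--                 t2 = min(r2, c); r2 -= t2
--                 answer += t0 * (d + i + s) + t1 * (5 * d + i + s) + t2 * (25 * d + 5 * i + s)
--     return answer
-- ===== Notes on version B (the rewrite author's own statement) =====
-- stated objective: alternative
-- what changed: A builds per-index buckets, comparison-sorts the groups and assigns picks via an inner scan over the picks array with in-place decrement and break; B slices the minerals into 5-chunks counted with list.count, histograms the (d,i,s) group types in a dict, and replaces the sort plus per-group greedy entirely by a counting-sort walk over the bounded descending key space (d,i,s with d+i+s<=5) that allocates picks in bulk per group type with arithmetic.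
import Mathlib
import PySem

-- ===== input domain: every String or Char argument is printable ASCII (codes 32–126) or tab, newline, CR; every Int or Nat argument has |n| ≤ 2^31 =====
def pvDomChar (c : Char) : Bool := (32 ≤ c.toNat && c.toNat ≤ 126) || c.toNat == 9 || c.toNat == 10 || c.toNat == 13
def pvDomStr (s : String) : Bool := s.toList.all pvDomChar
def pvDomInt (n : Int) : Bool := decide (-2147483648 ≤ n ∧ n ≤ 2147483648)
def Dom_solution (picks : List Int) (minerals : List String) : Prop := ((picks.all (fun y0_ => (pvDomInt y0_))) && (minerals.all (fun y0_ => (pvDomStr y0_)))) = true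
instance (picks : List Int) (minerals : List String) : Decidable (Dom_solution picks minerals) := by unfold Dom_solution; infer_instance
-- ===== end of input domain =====

-- B replaces A's comparison sort of the 5-mineral groups and its per-group inner scan over the
-- picks array (with in-place decrement and break) by a dict histogram of group types and a
-- counting-sort walk over the bounded descending key space that allocates picks in bulk
-- (objective: alternative). A mutates `picks` in place, B does not: the equivalence proved here
-- is about the return value only.

-- ===== PORT A =====
-- truncation line `if len(minerals)>sum(picks)*5: minerals=minerals[:sum(picks)*5]`
-- (textually identical in both Python sources, hence shared)
def pvTrunc (picks : List Int) (minerals : List String) : List String :=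
  if (minerals.length : Int) > picks.sum * 5 then
    PySem.List.slice minerals none (some (picks.sum * 5)) else minerals

-- one mineral added to a [d,i,s] group (A's three elif branches, in order)
def pvBump (t : Int × Int × Int) (m : String) : Int × Int × Int :=
  if m = "diamond" then (t.1 + 1, t.2.1, t.2.2)
  else if m = "iron" then (t.1, t.2.1 + 1, t.2.2)
  else if m = "stone" then (t.1, t.2.1, t.2.2 + 1)
  else t

-- A's bucket loop: `mlist[i//5][x] += 1` over i in range(len(minerals)); i < len ms so i/5 is in
-- range and getD's default is never read
def pvGroups (ms : List String) : List (Int × Int × Int) :=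
  (List.range ms.length).foldl
    (fun acc i => acc.set (i / 5) (pvBump (acc.getD (i / 5) (0, 0, 0)) (ms.getD i "")))
    (List.replicate (ms.length / 5 + 1) ((0 : Int), (0 : Int), (0 : Int)))

-- A's sort key (-d, -i, -s): Python tuple compare is lexicographic, hence Lex
def pvKeyFn (g : Int × Int × Int) : Lex (Int × Lex (Int × Int)) :=
  toLex (-g.1, toLex (-g.2.1, -g.2.2))

-- A's inner `for j in range(len(picks))` with break, mutating picks
def pvInner (dia iron stone : Int) (picks : List Int) (answer : Int) (j : Nat) : List Int × Int :=
  if _h : j < picks.length then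
    let pj := picks.getD j 0
    if pj > 0 && j == 0 then (picks.set j (pj - 1), answer + (dia + iron + stone))
    else if pj > 0 && j == 1 then (picks.set j (pj - 1), answer + (dia * 5 + iron + stone))
    else if pj > 0 && j == 2 then (picks.set j (pj - 1), answer + (dia * 25 + iron * 5 + stone))
    else pvInner dia iron stone picks answer (j + 1)
  else (picks, answer)
termination_by picks.length - j

-- A's outer loop over the sorted groups, threading (picks, answer)
def pvOuter : List (Int × Int × Int) → List Int → Int → List Int × Int
  | [], picks, answer => (picks, answer)
  | x :: xs, picks, answer =>
    let r := pvInner x.1 x.2.1 x.2.2 picks answer 0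
    pvOuter xs r.1 r.2

def solution (picks : List Int) (minerals : List String) : Int :=
  (pvOuter (PySem.List.sorted (pvGroups (pvTrunc picks minerals)) pvKeyFn false) picks 0).2

-- ===== PORT B =====
-- B's chunk key: (chunk.count('diamond'), chunk.count('iron'), chunk.count('stone')) of minerals[5k:5k+5]
def pvCKey (ms : List String) (k : Nat) : Int × Int × Int :=
  let chunk := PySem.List.slice ms (some (5 * (k : Int))) (some (5 * (k : Int) + 5))
  ((PySem.List.count chunk "diamond" : Int), (PySem.List.count chunk "iron" : Int),
    (PySem.List.count chunk "stone" : Int))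

-- B's histogram loop: cnt[key] = cnt.get(key, 0) + 1
def pvCnt (ms : List String) : PySem.Dict (Int × Int × Int) Int :=
  (List.range (ms.length / 5 + 1)).foldl
    (fun d k => d.insert (pvCKey ms k) (d.getD (pvCKey ms k) 0 + 1)) PySem.Dict.empty

-- B's loop body: bulk allocation of the remaining picks (r0,r1,r2) to the c groups of type t
def pvAlloc (cnt : PySem.Dict (Int × Int × Int) Int) (st : Int × Int × Int × Int)
    (t : Int × Int × Int) : Int × Int × Int × Int :=
  let c0 := cnt.getD t 0
  let t0 := min st.1 c0
  let c1 := c0 - t0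
  let t1 := min st.2.1 c1
  let c2 := c1 - t1
  let t2 := min st.2.2.1 c2
  (st.1 - t0, st.2.1 - t1, st.2.2.1 - t2,
    st.2.2.2 + t0 * (t.1 + t.2.1 + t.2.2) + t1 * (5 * t.1 + t.2.1 + t.2.2)
      + t2 * (25 * t.1 + 5 * t.2.1 + t.2.2))

def solution_alt (picks : List Int) (minerals : List String) : Int :=
  let ms := pvTrunc picks minerals
  let cnt := pvCnt ms
  -- r0 = max(picks[0], 0) if len(picks) > 0 else 0, and likewise r1, r2
  let r0 : Int := if 0 < picks.length then max (picks.getD 0 0) 0 else 0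
  let r1 : Int := if 1 < picks.length then max (picks.getD 1 0) 0 else 0
  let r2 : Int := if 2 < picks.length then max (picks.getD 2 0) 0 else 0
  -- for d in range(5,-1,-1): for i in range(5-d,-1,-1): for s in range(5-d-i,-1,-1): allocate
  ((PySem.List.pyRange 5 (-1) (-1)).foldl (fun st d =>
    (PySem.List.pyRange (5 - d) (-1) (-1)).foldl (fun st i =>
      (PySem.List.pyRange (5 - d - i) (-1) (-1)).foldl (fun st s =>
        pvAlloc cnt st (d, i, s)) st) st) (r0, r1, r2, 0)).2.2.2

-- ===== PRECONDITION & SPEC =====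
def Spec_solution (picks : List Int) (minerals : List String) (out : Int) : Prop := out = solution_alt picks minerals
instance (picks : List Int) (minerals : List String) (out : Int) : Decidable (Spec_solution picks minerals out) := by unfold Spec_solution; infer_instance

-- ===== CLAIM (what is proved, stated in full; the proofs are below) =====
def Claim_equal_solution : Prop := ∀ (picks : List Int) (minerals : List String), Dom_solution picks minerals → Spec_solution picks minerals (solution picks minerals)

-- ===== LEMMAS AND PROOFS =====

-- available swings of pick j (j < 3), as A's loop sees them
def pvC (picks : List Int) (j : Nat) : Nat :=
  if j < picks.length then (max (picks.getD j 0) 0).toNat else 0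

-- the best-first pick sequence A consumes, in replicate form
def pvRep3 (a b c : Nat) : List Nat :=
  List.replicate a 0 ++ List.replicate b 1 ++ List.replicate c 2

-- per-pick cost of a group
def pvCost (p : Nat) (g : Int × Int × Int) : Int :=
  if p == 0 then g.1 + g.2.1 + g.2.2
  else if p == 1 then g.1 * 5 + g.2.1 + g.2.2
  else g.1 * 25 + g.2.1 * 5 + g.2.2

-- total fatigue of matching the pick sequence against the sorted groups
def pvZipSum : List Nat → List (Int × Int × Int) → Int
  | p :: ps, g :: gs => pvCost p g + pvZipSum ps gs
  | _, _ => 0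

-- the descending key space B walks, as a flat list
def pvKeys : List (Int × Int × Int) :=
  (PySem.List.pyRange 5 (-1) (-1)).flatMap (fun d =>
    (PySem.List.pyRange (5 - d) (-1) (-1)).flatMap (fun i =>
      (PySem.List.pyRange (5 - d - i) (-1) (-1)).map (fun s => (d, i, s))))

-- A's group computed by chunks: fold of pvBump over minerals[5k:5k+5]
def pvChunkKey (ms : List String) (k : Nat) : Int × Int × Int :=
  ((ms.drop (5 * k)).take 5).foldl pvBump (0, 0, 0)

-- ---------- A-side: pvOuter = zip-sum of the pick sequence ----------

def pvRep (picks : List Int) : List Nat := pvRep3 (pvC picks 0) (pvC picks 1) (pvC picks 2)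

lemma pvZipSum_nil_right (s : List Nat) : pvZipSum s [] = 0 := by
  cases s <;> rfl

lemma pvInner_noop (d i s a : Int) (picks : List Int) :
    ∀ n j, picks.length ≤ j + n → 3 ≤ j → pvInner d i s picks a j = (picks, a) := by
  intro n
  induction n with
  | zero =>
    intro j hle _
    rw [pvInner]
    simp [Nat.not_lt.mpr (by omega : picks.length ≤ j)]
  | succ n ih =>
    intro j hle h3
    rw [pvInner]
    by_cases hj : j < picks.length
    · have e0 : (j == 0) = false := by simp; omega
      have e1 : (j == 1) = false := by simp; omega
      have e2 : (j == 2) = false := by simp; omega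
      simp only [hj, dif_pos, e0, e1, e2, Bool.and_false]
      simp only [Bool.false_eq_true, if_false]
      exact ih (j + 1) (by omega) (by omega)
    · simp [hj]

lemma pvInner_spec (d i s a : Int) (picks : List Int) :
    pvInner d i s picks a 0 =
      if 0 < picks.length ∧ 0 < picks.getD 0 0 then
        (picks.set 0 (picks.getD 0 0 - 1), a + (d + i + s))
      else if 1 < picks.length ∧ 0 < picks.getD 1 0 then
        (picks.set 1 (picks.getD 1 0 - 1), a + (d * 5 + i + s))
      else if 2 < picks.length ∧ 0 < picks.getD 2 0 then
        (picks.set 2 (picks.getD 2 0 - 1), a + (d * 25 + i * 5 + s))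
      else (picks, a) := by
  have hno : pvInner d i s picks a 3 = (picks, a) :=
    pvInner_noop d i s a picks picks.length 3 (by omega) (by omega)
  rw [pvInner]
  by_cases h0 : 0 < picks.length
  · by_cases hp0 : 0 < picks.getD 0 0
    · have hp0' : (0:Int) < picks[0] := by rw [List.getD_eq_getElem picks 0 h0] at hp0; exact_mod_cast hp0
      simp [h0, hp0']
    · have hp0' : ¬ (0:Int) < picks[0] := by rw [List.getD_eq_getElem picks 0 h0] at hp0; exact_mod_cast hp0
      rw [pvInner]
      by_cases h1 : 1 < picks.length
      · by_cases hp1 : 0 < picks.getD 1 0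
        · have hp1' : (0:Int) < picks[1] := by rw [List.getD_eq_getElem picks 0 h1] at hp1; exact_mod_cast hp1
          simp [h0, hp0', h1, hp1']
        · have hp1' : ¬ (0:Int) < picks[1] := by rw [List.getD_eq_getElem picks 0 h1] at hp1; exact_mod_cast hp1
          rw [pvInner]
          by_cases h2 : 2 < picks.length
          · by_cases hp2 : 0 < picks.getD 2 0
            · have hp2' : (0:Int) < picks[2] := by rw [List.getD_eq_getElem picks 0 h2] at hp2; exact_mod_cast hp2
              simp [h0, hp0', h1, hp1', h2, hp2']
            · have hp2' : ¬ (0:Int) < picks[2] := by rw [List.getD_eq_getElem picks 0 h2] at hp2; exact_mod_cast hp2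
              simp [h0, hp0', h1, hp1', h2, hp2', hno]
          · have h2' : ¬ (2 < picks.length) := h2
            simp [h0, hp0', h1, hp1', h2']
      · have h1' : ¬ (2 < picks.length) := by omega
        simp [h0, hp0', h1, h1']
  · have a1 : ¬ (1 < picks.length) := by omega
    have a2 : ¬ (2 < picks.length) := by omega
    simp [h0, a1, a2]

lemma pvC_eq (picks : List Int) (j : Nat) (h : j < picks.length) :
    pvC picks j = (max (picks.getD j 0) 0).toNat := by simp [pvC, h]

lemma pvC_set_self (picks : List Int) (j : Nat) (v : Int) (h : j < picks.length) :
    pvC (picks.set j v) j = (max v 0).toNat := by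
  simp [pvC, List.length_set, h]

lemma pvC_set_ne (picks : List Int) (j k : Nat) (v : Int) (h : j ≠ k) :
    pvC (picks.set j v) k = pvC picks k := by
  simp [pvC, List.length_set, List.getElem?_set_ne h]

lemma pvC_zero_of_not (picks : List Int) (j : Nat)
    (h : ¬ (j < picks.length ∧ 0 < picks.getD j 0)) : pvC picks j = 0 := by
  unfold pvC
  split_ifs with hl
  · have hle : picks.getD j 0 ≤ 0 := by by_contra hb; exact h ⟨hl, by omega⟩
    rw [max_eq_right hle]
    rfl
  · rfl

lemma pvOuter_spec : ∀ (gs : List (Int × Int × Int)) (picks : List Int) (a : Int),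
    (pvOuter gs picks a).2 = a + pvZipSum (pvRep picks) gs := by
  intro gs
  induction gs with
  | nil => intro picks a; simp [pvOuter, pvZipSum_nil_right]
  | cons g gs ih =>
    intro picks a
    simp only [pvOuter]
    rw [pvInner_spec]
    by_cases h0 : 0 < picks.length ∧ 0 < picks.getD 0 0
    · rw [if_pos h0]
      have hrep : pvRep picks = 0 :: pvRep (picks.set 0 (picks.getD 0 0 - 1)) := by
        unfold pvRep pvRep3
        have c0 : pvC picks 0 = pvC (picks.set 0 (picks.getD 0 0 - 1)) 0 + 1 := by
          rw [pvC_eq picks 0 h0.1, pvC_set_self picks 0 _ h0.1]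
          omega
        rw [c0, pvC_set_ne picks 0 1 _ (by omega), pvC_set_ne picks 0 2 _ (by omega),
            List.replicate_succ]
        simp
      rw [ih, hrep]
      simp only [pvZipSum, pvCost]
      norm_num
      ring
    · rw [if_neg h0]
      have hc0 : pvC picks 0 = 0 := pvC_zero_of_not picks 0 h0
      by_cases h1 : 1 < picks.length ∧ 0 < picks.getD 1 0
      · rw [if_pos h1]
        have hrep : pvRep picks = 1 :: pvRep (picks.set 1 (picks.getD 1 0 - 1)) := by
          unfold pvRep pvRep3
          have c1 : pvC picks 1 = pvC (picks.set 1 (picks.getD 1 0 - 1)) 1 + 1 := by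
            rw [pvC_eq picks 1 h1.1, pvC_set_self picks 1 _ h1.1]
            omega
          have c0' : pvC (picks.set 1 (picks.getD 1 0 - 1)) 0 = 0 := by
            rw [pvC_set_ne picks 1 0 _ (by omega)]; exact hc0
          rw [c1, pvC_set_ne picks 1 2 _ (by omega), List.replicate_succ, hc0, c0']
          simp
        rw [ih, hrep]
        simp only [pvZipSum, pvCost]
        norm_num
        ring
      · rw [if_neg h1]
        have hc1 : pvC picks 1 = 0 := pvC_zero_of_not picks 1 h1
        by_cases h2 : 2 < picks.length ∧ 0 < picks.getD 2 0
        · rw [if_pos h2]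
          have hrep : pvRep picks = 2 :: pvRep (picks.set 2 (picks.getD 2 0 - 1)) := by
            unfold pvRep pvRep3
            have c2 : pvC picks 2 = pvC (picks.set 2 (picks.getD 2 0 - 1)) 2 + 1 := by
              rw [pvC_eq picks 2 h2.1, pvC_set_self picks 2 _ h2.1]
              omega
            have c0' : pvC (picks.set 2 (picks.getD 2 0 - 1)) 0 = 0 := by
              rw [pvC_set_ne picks 2 0 _ (by omega)]; exact hc0
            have c1' : pvC (picks.set 2 (picks.getD 2 0 - 1)) 1 = 0 := by
              rw [pvC_set_ne picks 2 1 _ (by omega)]; exact hc1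
            rw [c2, List.replicate_succ, hc0, hc1, c0', c1']
            simp
          rw [ih, hrep]
          simp only [pvZipSum, pvCost]
          norm_num
          ring
        · rw [if_neg h2]
          have hc2 : pvC picks 2 = 0 := pvC_zero_of_not picks 2 h2
          have hrep : pvRep picks = [] := by
            unfold pvRep pvRep3
            rw [hc0, hc1, hc2]
            simp
          rw [ih, hrep]
          simp [pvZipSum]

-- ---------- A's bucket fold = chunk map ----------

lemma set_map_range {α : Type} (n j : Nat) (f : Nat → α) (v : α) (_hj : j < n) :
    ((List.range n).map f).set j v = (List.range n).map (fun k => if k = j then v else f k) := by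
  apply List.ext_getElem
  · simp
  · intro i h1 h2
    simp only [List.getElem_set, List.getElem_map, List.getElem_range]
    split_ifs with hx hy hy
    · rfl
    · omega
    · omega
    · rfl

lemma chunk_take_succ (ms : List String) (m k : Nat) (hm : m < ms.length) :
    ((ms.take (m + 1)).drop (5 * k)).take 5 =
      if k = m / 5 then ((ms.take m).drop (5 * k)).take 5 ++ [ms[m]]
      else ((ms.take m).drop (5 * k)).take 5 := by
  have htm : ms.take (m + 1) = ms.take m ++ [ms[m]] := List.take_succ_eq_append_getElem hm
  have hlen : (ms.take m).length = m := by simp; omega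
  split_ifs with hk
  · have h1 : 5 * k ≤ m := by omega
    have h2 : m - 5 * k < 5 := by omega
    rw [htm, List.drop_append_of_le_length (by omega), List.take_append]
    have hblen : ((ms.take m).drop (5 * k)).length = m - 5 * k := by simp; omega
    rw [List.take_of_length_le (by omega)]
    have : 5 - ((ms.take m).drop (5 * k)).length = (5 - (m - 5 * k) - 1) + 1 := by omega
    rw [this]
    simp
  · by_cases hlt : k < m / 5
    · have h5 : 5 * k + 5 ≤ m := by omega
      rw [htm, List.drop_append_of_le_length (by omega), List.take_append]
      have hblen : ((ms.take m).drop (5 * k)).length = m - 5 * k := by simp; omega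
      have : 5 - ((ms.take m).drop (5 * k)).length = 0 := by omega
      rw [this]
      simp
    · have hgt : m / 5 < k := by omega
      have h5 : m + 1 ≤ 5 * k := by omega
      rw [htm, List.drop_eq_nil_of_le (by simp; omega), List.drop_eq_nil_of_le (by omega)]

lemma groups_prefix (ms : List String) : ∀ m, m ≤ ms.length →
    (List.range m).foldl
      (fun acc i => acc.set (i / 5) (pvBump (acc.getD (i / 5) (0, 0, 0)) (ms.getD i "")))
      (List.replicate (ms.length / 5 + 1) ((0 : Int), (0 : Int), (0 : Int))) =
    (List.range (ms.length / 5 + 1)).map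
      (fun k => (((ms.take m).drop (5 * k)).take 5).foldl pvBump (0, 0, 0)) := by
  intro m
  induction m with
  | zero =>
    intro _
    rw [List.range_zero, List.foldl_nil]
    have : (List.range (ms.length / 5 + 1)).map
        (fun k => (((ms.take 0).drop (5 * k)).take 5).foldl pvBump
          ((0 : Int), (0 : Int), (0 : Int))) =
        (List.range (ms.length / 5 + 1)).map (fun _ => ((0 : Int), (0 : Int), (0 : Int))) := by
      simp
    rw [this, List.map_const']
    simp
  | succ m ih =>
    intro hm1
    have hm : m < ms.length := by omega
    have hK : m / 5 < ms.length / 5 + 1 := by omega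
    rw [List.range_succ, List.foldl_append, ih (by omega), List.foldl_cons, List.foldl_nil]
    have hgetD : ((List.range (ms.length / 5 + 1)).map
        (fun k => (((ms.take m).drop (5 * k)).take 5).foldl pvBump (0, 0, 0))).getD (m / 5)
          (0, 0, 0) =
        (((ms.take m).drop (5 * (m / 5))).take 5).foldl pvBump (0, 0, 0) := by
      rw [List.getD_eq_getElem _ _ (by simpa using hK)]
      simp
    rw [hgetD, List.getD_eq_getElem _ _ hm, set_map_range _ _ _ _ hK]
    refine List.map_congr_left (fun k hk => ?_)
    rw [chunk_take_succ ms m k hm]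
    split_ifs with hkm
    · subst hkm
      rw [List.foldl_append]
      simp
    · rfl

lemma pvGroups_eq_map (ms : List String) :
    pvGroups ms = (List.range (ms.length / 5 + 1)).map (pvChunkKey ms) := by
  unfold pvGroups pvChunkKey
  rw [groups_prefix ms ms.length le_rfl, List.take_length]

-- ---------- chunk fold = chunk counts ----------

lemma foldl_pvBump_counts (l : List String) : ∀ (a b c : Int),
    l.foldl pvBump (a, b, c) =
      (a + l.count "diamond", b + l.count "iron", c + l.count "stone") := by
  induction l with
  | nil => intro a b c; simp
  | cons x l ih =>
    intro a b c
    simp only [List.foldl_cons, pvBump, List.count_cons]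
    by_cases h1 : x = "diamond"
    · subst h1
      rw [ih]
      simp
      ring
    · by_cases h2 : x = "iron"
      · subst h2
        simp only [if_neg (by simp : ¬("iron" = "diamond"))]
        rw [ih]
        simp
        ring
      · by_cases h3 : x = "stone"
        · subst h3
          simp only [if_neg (by simp : ¬("stone" = "diamond")),
            if_neg (by simp : ¬("stone" = "iron"))]
          rw [ih]
          simp
          ring
        · simp only [if_neg h1, if_neg h2, if_neg h3]
          rw [ih]
          simp
          exact ⟨h1, h2, h3⟩

lemma pvCKey_eq_chunkKey (ms : List String) (k : Nat) :
    pvCKey ms k = pvChunkKey ms k := by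
  unfold pvCKey pvChunkKey
  have hs : PySem.List.slice ms (some (5 * (k : Int))) (some (5 * (k : Int) + 5)) =
      (ms.drop (5 * k)).take 5 := by
    have := PySem.List.slice_natCast_add ms (5 * k) 5
    push_cast at this ⊢
    simpa using this
  rw [hs, foldl_pvBump_counts]
  simp [PySem.List.count_eq]

-- ---------- bounds and key-space membership ----------

lemma count3_le_length (l : List String) :
    l.count "diamond" + l.count "iron" + l.count "stone" ≤ l.length := by
  induction l with
  | nil => simp
  | cons x l ih =>
    simp only [List.count_cons, List.length_cons]
    split_ifs <;> simp_all <;> omega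

lemma chunkKey_bounds (ms : List String) (k : Nat) :
    0 ≤ (pvChunkKey ms k).1 ∧ 0 ≤ (pvChunkKey ms k).2.1 ∧ 0 ≤ (pvChunkKey ms k).2.2 ∧
      (pvChunkKey ms k).1 + (pvChunkKey ms k).2.1 + (pvChunkKey ms k).2.2 ≤ 5 := by
  unfold pvChunkKey
  rw [foldl_pvBump_counts]
  have h1 := count3_le_length (((ms.drop (5 * k))).take 5)
  have h2 : (((ms.drop (5 * k))).take 5).length ≤ 5 := by
    simp [List.length_take]
  simp only [zero_add]
  refine ⟨by positivity, by positivity, by positivity, ?_⟩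
  omega

lemma mem_pvKeys (t : Int × Int × Int) (h0 : 0 ≤ t.1) (h1 : 0 ≤ t.2.1) (h2 : 0 ≤ t.2.2)
    (hs : t.1 + t.2.1 + t.2.2 ≤ 5) : t ∈ pvKeys := by
  unfold pvKeys
  simp only [List.mem_flatMap, List.mem_map, PySem.List.mem_pyRange_neg_one]
  exact ⟨t.1, ⟨by omega, by omega⟩, t.2.1, ⟨by omega, by omega⟩, t.2.2,
    ⟨by omega, by omega⟩, rfl⟩

lemma pvKeys_pairwise : pvKeys.Pairwise (fun a b => pvKeyFn a < pvKeyFn b) := by decide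

lemma pvKeys_nodup : pvKeys.Nodup := by decide

lemma pvKeyFn_injective : Function.Injective pvKeyFn := by
  intro a b h
  simp only [pvKeyFn, toLex_inj, Prod.mk.injEq, neg_inj] at h
  obtain ⟨h1, h2, h3⟩ := h
  exact Prod.ext h1 (Prod.ext h2 h3)

-- ---------- the sorted list is the key-space walk ----------

lemma perm_flatMap_replicate_count {α : Type} [BEq α] [LawfulBEq α] :
    ∀ (keys l : List α), keys.Nodup → (∀ y ∈ l, y ∈ keys) →
      (keys.flatMap (fun t => List.replicate (l.count t) t)).Perm l := by
  intro keys
  induction keys with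
  | nil =>
    intro l _ hmem
    have hl : l = [] := List.eq_nil_iff_forall_not_mem.mpr (fun a ha => by simpa using hmem a ha)
    subst hl
    simp
  | cons t rest ih =>
    intro l hnd hmem
    simp only [List.flatMap_cons]
    have hrep : List.replicate (l.count t) t = l.filter (fun x => x == t) :=
      (List.filter_beq t).symm
    have hcongr : rest.flatMap (fun s => List.replicate (l.count s) s) =
        rest.flatMap (fun s => List.replicate ((l.filter (fun x => !(x == t))).count s) s) := by
      rw [List.flatMap_def, List.flatMap_def]
      refine congrArg List.flatten (List.map_congr_left (fun s hs => ?_))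
      have hst : s ≠ t := by
        rintro rfl
        exact (List.nodup_cons.mp hnd).1 hs
      rw [List.count_filter (by simpa using hst)]
    have hperm2 : (rest.flatMap
        (fun s => List.replicate ((l.filter (fun x => !(x == t))).count s) s)).Perm
        (l.filter (fun x => !(x == t))) := by
      refine ih _ (List.nodup_cons.mp hnd).2 (fun y hy => ?_)
      have hyl := List.of_mem_filter hy
      have hyt : y ≠ t := by simpa using hyl
      rcases List.mem_cons.mp (hmem y (List.mem_of_mem_filter hy)) with h | h
      · exact absurd h hyt
      · exact h
    rw [hrep, hcongr]
    exact (List.Perm.append_left _ hperm2).trans (List.filter_append_perm _ l)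

lemma pairwise_flatMap_replicate (keys : List (Int × Int × Int)) (m : Int × Int × Int → Nat)
    (hpw : keys.Pairwise (fun a b => pvKeyFn a < pvKeyFn b)) :
    (keys.flatMap (fun t => List.replicate (m t) t)).Pairwise
      (fun a b => pvKeyFn a ≤ pvKeyFn b) := by
  induction keys with
  | nil => simp
  | cons t rest ih =>
    rw [List.pairwise_cons] at hpw
    simp only [List.flatMap_cons]
    rw [List.pairwise_append]
    refine ⟨List.pairwise_replicate.mpr (Or.inr le_rfl), ih hpw.2, fun a ha b hb => ?_⟩
    have hat : a = t := List.eq_of_mem_replicate ha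
    rcases List.mem_flatMap.mp hb with ⟨s, hs, hbs⟩
    have hbs' : b = s := List.eq_of_mem_replicate hbs
    rw [hat, hbs']
    exact le_of_lt (hpw.1 s hs)

lemma sorted_eq_blocks (ms : List String) :
    PySem.List.sorted (pvGroups ms) pvKeyFn false =
      pvKeys.flatMap (fun t => List.replicate ((pvGroups ms).count t) t) := by
  have hmem : ∀ y ∈ pvGroups ms, y ∈ pvKeys := by
    intro y hy
    rw [pvGroups_eq_map] at hy
    rcases List.mem_map.mp hy with ⟨k, _, rfl⟩
    obtain ⟨b0, b1, b2, bs⟩ := chunkKey_bounds ms k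
    exact mem_pvKeys _ b0 b1 b2 bs
  have hperm : (pvKeys.flatMap (fun t => List.replicate ((pvGroups ms).count t) t)).Perm
      (pvGroups ms) := perm_flatMap_replicate_count pvKeys (pvGroups ms) pvKeys_nodup hmem
  exact PySem.List.eq_of_perm_of_pairwise_le_of_injective pvKeyFn pvKeyFn_injective
    ((PySem.List.sorted_perm (pvGroups ms) pvKeyFn false).trans hperm.symm)
    (PySem.List.sorted_pairwise (pvGroups ms) pvKeyFn)
    (pairwise_flatMap_replicate pvKeys _ pvKeys_pairwise)

-- ---------- B's dict is the group-type histogram ----------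

lemma pvCnt_getD (ms : List String) (t : Int × Int × Int) :
    (pvCnt ms).getD t 0 = ((pvGroups ms).count t : Int) := by
  have h1 : pvCnt ms = ((List.range (ms.length / 5 + 1)).map (pvCKey ms)).foldl
      (fun d x => d.insert x (d.getD x 0 + 1)) PySem.Dict.empty := by
    rw [List.foldl_map]
    rfl
  rw [h1, PySem.Dict.getD_foldl_insert_add_one]
  have hmap : (List.range (ms.length / 5 + 1)).map (pvCKey ms) = pvGroups ms := by
    rw [pvGroups_eq_map]
    exact List.map_congr_left (fun k _ => pvCKey_eq_chunkKey ms k)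
  rw [hmap, PySem.Dict.getD_empty]
  simp

-- ---------- B's nested loops = flat fold over pvKeys ----------

lemma nested_eq_flat (cnt : PySem.Dict (Int × Int × Int) Int) (st : Int × Int × Int × Int) :
    ((PySem.List.pyRange 5 (-1) (-1)).foldl (fun st d =>
      (PySem.List.pyRange (5 - d) (-1) (-1)).foldl (fun st i =>
        (PySem.List.pyRange (5 - d - i) (-1) (-1)).foldl (fun st s =>
          pvAlloc cnt st (d, i, s)) st) st) st) =
    pvKeys.foldl (pvAlloc cnt) st := by
  unfold pvKeys
  rw [List.foldl_flatMap]
  apply PySem.List.foldl_congr_mem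
  intro acc d _
  rw [List.foldl_flatMap]
  apply PySem.List.foldl_congr_mem
  intro acc2 i _
  rw [List.foldl_map]

-- ---------- the bulk-allocation fold computes the zip-sum ----------

lemma zipSum_replicate_block (t : Int × Int × Int) (gs : List (Int × Int × Int)) :
    ∀ (n a b c : Nat),
      pvZipSum (pvRep3 a b c) (List.replicate n t ++ gs) =
        ((min a n : Nat) : Int) * pvCost 0 t + ((min b (n - min a n) : Nat) : Int) * pvCost 1 t
          + ((min c (n - min a n - min b (n - min a n)) : Nat) : Int) * pvCost 2 t
          + pvZipSum (pvRep3 (a - min a n) (b - min b (n - min a n))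
              (c - min c (n - min a n - min b (n - min a n)))) gs := by
  intro n
  induction n with
  | zero =>
    intro a b c
    simp
  | succ n ih =>
    intro a b c
    rw [List.replicate_succ, List.cons_append]
    cases a with
    | succ a' =>
      have hrep : pvRep3 (a' + 1) b c = 0 :: pvRep3 a' b c := by
        simp [pvRep3, List.replicate_succ]
      rw [hrep]
      show pvCost 0 t + pvZipSum (pvRep3 a' b c) (List.replicate n t ++ gs) = _
      rw [ih]
      have e1 : min (a' + 1) (n + 1) = min a' n + 1 := by omega
      have e2 : n + 1 - (min a' n + 1) = n - min a' n := by omega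
      have e3 : a' + 1 - (min a' n + 1) = a' - min a' n := by omega
      rw [e1, e2, e3]
      push_cast
      ring
    | zero =>
      cases b with
      | succ b' =>
        have hrep : pvRep3 0 (b' + 1) c = 1 :: pvRep3 0 b' c := by
          simp [pvRep3, List.replicate_succ]
        rw [hrep]
        show pvCost 1 t + pvZipSum (pvRep3 0 b' c) (List.replicate n t ++ gs) = _
        rw [ih]
        simp only [Nat.zero_min, Nat.sub_zero]
        have e1 : min (b' + 1) (n + 1) = min b' n + 1 := by omega
        have e2 : n + 1 - (min b' n + 1) = n - min b' n := by omega
        have e3 : b' + 1 - (min b' n + 1) = b' - min b' n := by omega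
        rw [e1, e2, e3]
        push_cast
        ring
      | zero =>
        cases c with
        | succ c' =>
          have hrep : pvRep3 0 0 (c' + 1) = 2 :: pvRep3 0 0 c' := by
            simp [pvRep3, List.replicate_succ]
          rw [hrep]
          show pvCost 2 t + pvZipSum (pvRep3 0 0 c') (List.replicate n t ++ gs) = _
          rw [ih]
          simp only [Nat.zero_min, Nat.sub_zero]
          have e1 : min (c' + 1) (n + 1) = min c' n + 1 := by omega
          have e2 : c' + 1 - (min c' n + 1) = c' - min c' n := by omega
          rw [e1, e2]
          push_cast
          ring
        | zero =>
          simp only [Nat.zero_min, Nat.sub_zero]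
          show (0 : Int) = _
          simp [pvRep3, pvZipSum]

lemma foldl_alloc_spec (cnt : PySem.Dict (Int × Int × Int) Int) (f : Int × Int × Int → Nat)
    (hm : ∀ t, cnt.getD t 0 = (f t : Int)) :
    ∀ (keys : List (Int × Int × Int)) (a b c : Nat) (acc : Int),
      (keys.foldl (pvAlloc cnt) ((a : Int), (b : Int), (c : Int), acc)).2.2.2 =
        acc + pvZipSum (pvRep3 a b c) (keys.flatMap (fun t => List.replicate (f t) t)) := by
  intro keys
  induction keys with
  | nil =>
    intro a b c acc
    simp [pvZipSum_nil_right]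
  | cons t keys ih =>
    intro a b c acc
    rw [List.foldl_cons, List.flatMap_cons]
    have hst : pvAlloc cnt ((a : Int), (b : Int), (c : Int), acc) t =
        (((a - min a (f t) : Nat) : Int),
         ((b - min b (f t - min a (f t)) : Nat) : Int),
         ((c - min c (f t - min a (f t) - min b (f t - min a (f t))) : Nat) : Int),
         acc + ((min a (f t) : Nat) : Int) * (t.1 + t.2.1 + t.2.2)
             + ((min b (f t - min a (f t)) : Nat) : Int) * (5 * t.1 + t.2.1 + t.2.2)
             + ((min c (f t - min a (f t) - min b (f t - min a (f t))) : Nat) : Int)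
                 * (25 * t.1 + 5 * t.2.1 + t.2.2)) := by
      simp only [pvAlloc, hm t]
      have m0 : min (a : Int) ((f t : Nat) : Int) = ((min a (f t) : Nat) : Int) := by omega
      have m1 : min (b : Int) (((f t : Nat) : Int) - ((min a (f t) : Nat) : Int)) =
          ((min b (f t - min a (f t)) : Nat) : Int) := by omega
      have m2 : min (c : Int) (((f t : Nat) : Int) - ((min a (f t) : Nat) : Int)
            - ((min b (f t - min a (f t)) : Nat) : Int)) =
          ((min c (f t - min a (f t) - min b (f t - min a (f t))) : Nat) : Int) := by omega
      rw [m0, m1, m2]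
      simp only [Prod.mk.injEq]
      refine ⟨by omega, by omega, by omega, trivial⟩
    rw [hst, ih, zipSum_replicate_block]
    simp only [pvCost]
    norm_num
    ring

-- ===== VERDICT (by name: the statement is the Claim_ definition above) =====
theorem solution_spec : Claim_equal_solution := by
  intro picks minerals _
  unfold Spec_solution solution
  have halt : solution_alt picks minerals =
      (pvKeys.foldl (pvAlloc (pvCnt (pvTrunc picks minerals)))
        (((pvC picks 0 : Nat) : Int), ((pvC picks 1 : Nat) : Int),
          ((pvC picks 2 : Nat) : Int), 0)).2.2.2 := by
    have h0 : (if 0 < picks.length then max (picks.getD 0 0) 0 else 0 : Int) =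
        ((pvC picks 0 : Nat) : Int) := by
      unfold pvC; split_ifs <;> simp
    have h1 : (if 1 < picks.length then max (picks.getD 1 0) 0 else 0 : Int) =
        ((pvC picks 1 : Nat) : Int) := by
      unfold pvC; split_ifs <;> simp
    have h2 : (if 2 < picks.length then max (picks.getD 2 0) 0 else 0 : Int) =
        ((pvC picks 2 : Nat) : Int) := by
      unfold pvC; split_ifs <;> simp
    simp only [solution_alt]
    rw [nested_eq_flat, h0, h1, h2]
  rw [halt, foldl_alloc_spec (pvCnt (pvTrunc picks minerals))
    (fun t => (pvGroups (pvTrunc picks minerals)).count t) (pvCnt_getD (pvTrunc picks minerals)),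
    pvOuter_spec, sorted_eq_blocks]
  rfl
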